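-- pv_equiv track=rewrite | github.com/KerimovEmil/ProjectEuler | solutions/PE753.py | given_p_simple
-- ===== SOURCE A (Python) =====
-- def given_p_simple(p: int) -> int:
--     if p % 3 != 1:
--         return (p-1)*(p-2)
--
--     dc_c_values = {}
--     for i in range(1, p):
--         i3 = i ** 3 % p
--         dc_c_values[i3] = 1 + dc_c_values.get(i3, 0)
--
--     ans = 0
--
--     for i in range(1, p):
--         cubed_sum = (2*i**3) % p
--         ans += dc_c_values.get(cubed_sum, 0)
--
--     for i in range(1, p):
--         for j in range(i+1, p):
--             cubed_sum = (i**3 + j**3) % p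
--             ans += 2*dc_c_values.get(cubed_sum, 0)
--
--     return ans
-- ===== SOURCE B (Python) =====
-- def given_p_simple(p: int) -> int:
--     if p % 3 != 1:
--         return (p - 1) * (p - 2)
--     counts = {}
--     for i in range(1, p):
--         r = i * i * i % p
--         counts[r] = counts.get(r, 0) + 1
--     items = list(counts.items())
--     ans = 0
--     for a, m in items:
--         for b, n in items:
--             ans += m * n * counts.get((a + b) % p, 0)
--     return ans
-- ===== Notes on version B (the rewrite author's own statement) =====
-- stated objective: alternative
-- what changed: Instead of summing dict lookups over all (p-1)^2 index pairs (diagonal plus doubled triangle), B convolves the cube-residue counter with itself, looping over the distinct cube residues weighted by their multiplicities; it trades the index double loop for a residue-level convolution, which shrinks the loop when many cubes collide (e.g. prime p = 1 mod 3) but not for a generic modulus.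
import Mathlib
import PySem

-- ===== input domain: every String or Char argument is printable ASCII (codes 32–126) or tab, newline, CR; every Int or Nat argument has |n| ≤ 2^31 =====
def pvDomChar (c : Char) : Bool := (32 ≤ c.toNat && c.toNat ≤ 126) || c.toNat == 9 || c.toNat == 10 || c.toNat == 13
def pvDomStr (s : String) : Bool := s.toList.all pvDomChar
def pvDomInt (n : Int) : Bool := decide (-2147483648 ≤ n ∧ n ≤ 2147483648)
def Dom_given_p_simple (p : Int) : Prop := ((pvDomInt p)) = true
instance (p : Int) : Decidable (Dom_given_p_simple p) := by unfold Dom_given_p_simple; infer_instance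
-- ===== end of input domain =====

-- B replaces A's double loop over all index pairs by a self-convolution of the cube-residue
-- counter over its distinct keys (an alternative residue-level algorithm, same worst-case cost).

-- ===== PORT A =====
def given_p_simple (p : Int) : Int :=
  if PySem.Int.mod p 3 ≠ 1 then (p - 1) * (p - 2)
  else
    let dc := (PySem.List.pyRange 1 p 1).foldl
      (fun d i =>
        let i3 := PySem.Int.mod (i ^ 3) p
        d.insert i3 (1 + d.getD i3 0))
      (PySem.Dict.empty : PySem.Dict Int Int)
    let ans1 := (PySem.List.pyRange 1 p 1).foldl
      (fun ans i => ans + dc.getD (PySem.Int.mod (2 * i ^ 3) p) 0) 0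
    (PySem.List.pyRange 1 p 1).foldl
      (fun ans i =>
        (PySem.List.pyRange (i + 1) p 1).foldl
          (fun ans j => ans + 2 * dc.getD (PySem.Int.mod (i ^ 3 + j ^ 3) p) 0) ans)
      ans1

-- ===== PORT B =====
def given_p_simple_alt (p : Int) : Int :=
  if PySem.Int.mod p 3 ≠ 1 then (p - 1) * (p - 2)
  else
    let counts := (PySem.List.pyRange 1 p 1).foldl
      (fun d i =>
        let r := PySem.Int.mod (i * i * i) p
        d.insert r (d.getD r 0 + 1))
      (PySem.Dict.empty : PySem.Dict Int Int)
    let items := counts.items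
    items.foldl
      (fun ans am =>
        items.foldl
          (fun ans bn => ans + am.2 * bn.2 * counts.getD (PySem.Int.mod (am.1 + bn.1) p) 0)
          ans)
      0

-- ===== PRECONDITION & SPEC =====
def Spec_given_p_simple (p : Int) (out : Int) : Prop := out = given_p_simple_alt p
instance (p : Int) (out : Int) : Decidable (Spec_given_p_simple p out) := by unfold Spec_given_p_simple; infer_instance

-- ===== CLAIM (what is proved, stated in full; the proofs are below) =====
def Claim_equal_given_p_simple : Prop := ∀ (p : Int), Dom_given_p_simple p → Spec_given_p_simple p (given_p_simple p)

-- ===== LEMMAS AND PROOFS =====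

-- the list of cube residues of 1..p-1
def pvCubes (p : Int) : List Int :=
  (PySem.List.pyRange 1 p 1).map (fun i => PySem.Int.mod (i ^ 3) p)

-- summing v * h k over a counter's items is summing h over the underlying list
lemma pv_fiber (ks : List Int) (h : Int → Int) :
    (((PySem.Dict.counter ks).items).map (fun am => am.2 * h am.1)).sum
      = (ks.map h).sum := by
  rw [PySem.Dict.items_counter, List.map_map]
  have hnd : (PySem.Set.ofList ks).Nodup := PySem.Set.nodup_ofList ks
  rw [show ((PySem.Set.ofList ks).map
        ((fun am : Int × Int => am.2 * h am.1) ∘ fun k => (k, (ks.count k : Int)))).sum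
      = ((PySem.Set.ofList ks).map (fun k => (ks.count k : Int) * h k)).sum from rfl]
  rw [← List.sum_toFinset _ hnd]
  have hfs : (PySem.Set.ofList ks).toFinset = ks.toFinset := by
    ext a
    simp [PySem.Set.mem_ofList]
  rw [hfs, Finset.sum_list_map_count]
  simp

-- Python mod congruence for a positive modulus
lemma pv_mod_add (p : Int) (hp : 0 < p) (x y : Int) :
    PySem.Int.mod (PySem.Int.mod x p + PySem.Int.mod y p) p = PySem.Int.mod (x + y) p := by
  simp only [PySem.Int.mod_eq_emod_of_pos hp]
  exact (Int.add_emod x y p).symm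

-- full square sum = diagonal + 2 * strict upper triangle, over pyRange a p 1
lemma pv_sq_split (p : Int) (f : Int → Int → Int) (hsym : ∀ x y, f x y = f y x) :
    ∀ (n : Nat) (a : Int), (p - a).toNat = n →
    ((PySem.List.pyRange a p 1).map
        (fun x => ((PySem.List.pyRange a p 1).map (fun y => f x y)).sum)).sum
      = ((PySem.List.pyRange a p 1).map (fun x => f x x)).sum
        + 2 * ((PySem.List.pyRange a p 1).map
            (fun i => ((PySem.List.pyRange (i + 1) p 1).map (fun j => f i j)).sum)).sum := by
  intro n
  induction n with
  | zero =>
    intro a ha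
    have hpa : p ≤ a := by omega
    simp [PySem.List.pyRange_one_eq_nil hpa]
  | succ n ih =>
    intro a ha
    have hap : a < p := by omega
    have IH := ih (a + 1) (by omega)
    simp only [PySem.List.pyRange_one_cons hap, List.map_cons, List.sum_cons]
    rw [PySem.List.sum_map_add_int (PySem.List.pyRange (a + 1) p 1)
      (fun x => f x a) (fun x => ((PySem.List.pyRange (a + 1) p 1).map (fun y => f x y)).sum)]
    have hswap : ((PySem.List.pyRange (a + 1) p 1).map (fun x => f x a)).sum
        = ((PySem.List.pyRange (a + 1) p 1).map (fun y => f a y)).sum :=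
      congrArg List.sum (List.map_congr_left (fun x _ => hsym x a))
    linarith [IH, hswap]

-- both ports build the same dictionary: the counter of the cube residues
lemma pv_dictA (p : Int) :
    (PySem.List.pyRange 1 p 1).foldl
      (fun d i =>
        let i3 := PySem.Int.mod (i ^ 3) p
        d.insert i3 (1 + d.getD i3 0))
      (PySem.Dict.empty : PySem.Dict Int Int) = PySem.Dict.counter (pvCubes p) := by
  have h1 : ∀ (d : PySem.Dict Int Int) (i : Int), i ∈ PySem.List.pyRange 1 p 1 →
      (let i3 := PySem.Int.mod (i ^ 3) p
       d.insert i3 (1 + d.getD i3 0))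
        = d.insert (PySem.Int.mod (i ^ 3) p) (d.getD (PySem.Int.mod (i ^ 3) p) 0 + 1) := by
    intro d i _
    simp [Int.add_comm]
  trans ((PySem.List.pyRange 1 p 1).foldl
      (fun d i => d.insert (PySem.Int.mod (i ^ 3) p) (d.getD (PySem.Int.mod (i ^ 3) p) 0 + 1))
      (PySem.Dict.empty : PySem.Dict Int Int))
  · exact PySem.List.foldl_congr_mem _ _ _ _ h1
  trans ((pvCubes p).foldl (fun d x => d.insert x (d.getD x 0 + 1))
      (PySem.Dict.empty : PySem.Dict Int Int))
  · simp only [pvCubes, List.foldl_map]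
  · exact PySem.Dict.foldl_insert_getD_add_one_eq_counter _

lemma pv_dictB (p : Int) :
    (PySem.List.pyRange 1 p 1).foldl
      (fun d i =>
        let r := PySem.Int.mod (i * i * i) p
        d.insert r (d.getD r 0 + 1))
      (PySem.Dict.empty : PySem.Dict Int Int) = PySem.Dict.counter (pvCubes p) := by
  have h1 : ∀ (d : PySem.Dict Int Int) (i : Int), i ∈ PySem.List.pyRange 1 p 1 →
      (let r := PySem.Int.mod (i * i * i) p
       d.insert r (d.getD r 0 + 1))
        = d.insert (PySem.Int.mod (i ^ 3) p) (d.getD (PySem.Int.mod (i ^ 3) p) 0 + 1) := by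
    intro d i _
    have : i * i * i = i ^ 3 := by ring
    simp [this]
  trans ((PySem.List.pyRange 1 p 1).foldl
      (fun d i => d.insert (PySem.Int.mod (i ^ 3) p) (d.getD (PySem.Int.mod (i ^ 3) p) 0 + 1))
      (PySem.Dict.empty : PySem.Dict Int Int))
  · exact PySem.List.foldl_congr_mem _ _ _ _ h1
  trans ((pvCubes p).foldl (fun d x => d.insert x (d.getD x 0 + 1))
      (PySem.Dict.empty : PySem.Dict Int Int))
  · simp only [pvCubes, List.foldl_map]
  · exact PySem.Dict.foldl_insert_getD_add_one_eq_counter _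

-- double-sum version of pv_fiber: convolving the counter's items equals the double sum over the list
lemma pv_fiber2 (ks : List Int) (F : Int → Int → Int) :
    (((PySem.Dict.counter ks).items).map (fun am =>
        (((PySem.Dict.counter ks).items).map (fun bn => am.2 * bn.2 * F am.1 bn.1)).sum)).sum
      = (ks.map (fun a => (ks.map (fun b => F a b)).sum)).sum := by
  have inner : ∀ a m : Int,
      (((PySem.Dict.counter ks).items).map (fun bn => m * bn.2 * F a bn.1)).sum
        = m * (ks.map (fun b => F a b)).sum := by
    intro a m
    have h1 : (((PySem.Dict.counter ks).items).map (fun bn => m * bn.2 * F a bn.1)).sum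
        = (((PySem.Dict.counter ks).items).map (fun bn => m * (bn.2 * F a bn.1))).sum :=
      congrArg List.sum (List.map_congr_left (fun bn _ => by ring))
    rw [h1, List.sum_map_mul_left, pv_fiber ks (fun b => F a b)]
  calc (((PySem.Dict.counter ks).items).map (fun am =>
        (((PySem.Dict.counter ks).items).map (fun bn => am.2 * bn.2 * F am.1 bn.1)).sum)).sum
      = (((PySem.Dict.counter ks).items).map
          (fun am => am.2 * (ks.map (fun b => F am.1 b)).sum)).sum :=
        congrArg List.sum (List.map_congr_left (fun am _ => inner am.1 am.2))
    _ = (ks.map (fun a => (ks.map (fun b => F a b)).sum)).sum :=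
        pv_fiber ks (fun a => (ks.map (fun b => F a b)).sum)

-- A's value in the p % 3 == 1 branch is the full square sum over all index pairs
lemma pv_A_eq (p : Int) (hm : PySem.Int.mod p 3 = 1) :
    given_p_simple p
      = ((PySem.List.pyRange 1 p 1).map (fun x =>
          ((PySem.List.pyRange 1 p 1).map (fun y =>
            (PySem.Dict.counter (pvCubes p)).getD (PySem.Int.mod (x ^ 3 + y ^ 3) p) 0)).sum)).sum := by
  unfold given_p_simple
  rw [if_neg (not_not_intro hm), pv_dictA]
  simp only [PySem.List.foldl_add, zero_add]
  have hdiag : ((PySem.List.pyRange 1 p 1).map (fun i =>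
        (PySem.Dict.counter (pvCubes p)).getD (PySem.Int.mod (2 * i ^ 3) p) 0)).sum
      = ((PySem.List.pyRange 1 p 1).map (fun i =>
        (PySem.Dict.counter (pvCubes p)).getD (PySem.Int.mod (i ^ 3 + i ^ 3) p) 0)).sum :=
    congrArg List.sum (List.map_congr_left (fun i _ => by rw [two_mul]))
  have htri : ((PySem.List.pyRange 1 p 1).map (fun i =>
        ((PySem.List.pyRange (i + 1) p 1).map (fun j =>
          2 * (PySem.Dict.counter (pvCubes p)).getD (PySem.Int.mod (i ^ 3 + j ^ 3) p) 0)).sum)).sum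
      = 2 * ((PySem.List.pyRange 1 p 1).map (fun i =>
        ((PySem.List.pyRange (i + 1) p 1).map (fun j =>
          (PySem.Dict.counter (pvCubes p)).getD (PySem.Int.mod (i ^ 3 + j ^ 3) p) 0)).sum)).sum := by
    rw [congrArg List.sum (List.map_congr_left
      (fun i (_ : i ∈ PySem.List.pyRange 1 p 1) => List.sum_map_mul_left _ _ _)),
      List.sum_map_mul_left]
  rw [hdiag, htri]
  exact (pv_sq_split p
    (fun x y => (PySem.Dict.counter (pvCubes p)).getD (PySem.Int.mod (x ^ 3 + y ^ 3) p) 0)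
    (fun x y => by simp only [Int.add_comm (x ^ 3) (y ^ 3)]) (p - 1).toNat 1 rfl).symm

-- B's value in the p % 3 == 1 branch is the same square sum
lemma pv_B_eq (p : Int) (hp : 0 < p) (hm : PySem.Int.mod p 3 = 1) :
    given_p_simple_alt p
      = ((PySem.List.pyRange 1 p 1).map (fun x =>
          ((PySem.List.pyRange 1 p 1).map (fun y =>
            (PySem.Dict.counter (pvCubes p)).getD (PySem.Int.mod (x ^ 3 + y ^ 3) p) 0)).sum)).sum := by
  unfold given_p_simple_alt
  rw [if_neg (not_not_intro hm), pv_dictB]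
  simp only [PySem.List.foldl_add, zero_add]
  rw [pv_fiber2 (pvCubes p)
    (fun a b => (PySem.Dict.counter (pvCubes p)).getD (PySem.Int.mod (a + b) p) 0)]
  simp only [pvCubes, List.map_map, Function.comp_def, pv_mod_add p hp]

-- ===== VERDICT (by name: the statement is the Claim_ definition above) =====
theorem given_p_simple_spec : Claim_equal_given_p_simple := by
  intro p _
  unfold Spec_given_p_simple
  by_cases hm : PySem.Int.mod p 3 = 1
  · by_cases hp1 : p ≤ 1
    · unfold given_p_simple given_p_simple_alt
      rw [if_neg (not_not_intro hm), if_neg (not_not_intro hm),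
        PySem.List.pyRange_one_eq_nil hp1]
      simp
    · exact (pv_A_eq p hm).trans (pv_B_eq p (by omega) hm).symm
  · unfold given_p_simple given_p_simple_alt
    rw [if_pos hm, if_pos hm]
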